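-- pv_equiv track=rewrite | github.com/Saravana-Ace/CS38003 | Lab 2/problem3.py | similarityAnalysis
-- ===== SOURCE A (Python) =====
-- def similarityAnalysis(paragraph1, paragraph2):
--     para3 = paragraph1 + paragraph2
--     all_words = {}
--
--     for word in para3:
--         temp_list = []
--
--         counter_para1 = 0
--         counter_para2 = 0
--
--         for para1_word in paragraph1:
--             if word == para1_word:
--                 counter_para1 += 1
--
--         for para2_word in paragraph2:
--             if word == para2_word:
--                 counter_para2 += 1
--
--         temp_list.append(counter_para1)
--         temp_list.append(counter_para2)
--
--         all_words[word] = temp_list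
--
--     return all_words
-- ===== SOURCE B (Python) =====
-- def similarityAnalysis(paragraph1, paragraph2):
--     all_words = {}
--     for w in paragraph1:
--         all_words.setdefault(w, [0, 0])[0] += 1
--     for w in paragraph2:
--         all_words.setdefault(w, [0, 0])[1] += 1
--     return all_words
-- ===== Notes on version B (the rewrite author's own statement) =====
-- stated objective: faster
-- what changed: Replaced A's loop over the concatenated list with two full counting scans per element by two single accumulation passes that build the count table directly via setdefault-and-increment.
import Mathlib
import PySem

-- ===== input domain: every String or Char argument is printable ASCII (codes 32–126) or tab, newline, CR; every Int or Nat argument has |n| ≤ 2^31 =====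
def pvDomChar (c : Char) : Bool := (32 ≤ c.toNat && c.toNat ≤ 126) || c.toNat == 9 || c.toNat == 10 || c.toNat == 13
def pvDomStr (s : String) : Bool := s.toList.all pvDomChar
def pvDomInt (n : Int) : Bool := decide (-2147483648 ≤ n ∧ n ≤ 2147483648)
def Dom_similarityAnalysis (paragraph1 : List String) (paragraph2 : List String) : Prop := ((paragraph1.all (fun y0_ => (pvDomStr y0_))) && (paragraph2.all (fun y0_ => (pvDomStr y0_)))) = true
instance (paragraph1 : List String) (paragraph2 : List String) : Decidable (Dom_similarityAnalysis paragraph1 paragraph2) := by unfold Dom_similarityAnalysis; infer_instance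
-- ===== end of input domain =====

-- B replaces A's rescan-per-word with two linear setdefault-accumulation passes (objective: faster; measured).

-- ===== PORT A =====
-- inner counting loop of A: 'counter = 0; for x in lst: if word == x: counter += 1'
def pvCountLoop (word : String) (lst : List String) : Int :=
  lst.foldl (fun c x => if word == x then c + 1 else c) 0

def similarityAnalysis (paragraph1 : List String) (paragraph2 : List String) : List (String × List Int) :=
  -- para3 = paragraph1 + paragraph2; for word in para3: all_words[word] = [count in p1, count in p2]
  ((paragraph1 ++ paragraph2).foldl
      (fun d word => d.insert word [pvCountLoop word paragraph1, pvCountLoop word paragraph2])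
      (PySem.Dict.empty : PySem.Dict String (List Int))).items

-- ===== PORT B =====
-- 'd.setdefault(w, [0,0])[i] += 1' = set d[w] to d.get(w, [0,0]) with component i incremented
def pvBump0 : List Int → List Int
  | a :: rest => (a + 1) :: rest
  | [] => []
def pvBump1 : List Int → List Int
  | a :: b :: rest => a :: (b + 1) :: rest
  | l => l

def similarityAnalysis_alt (paragraph1 : List String) (paragraph2 : List String) : List (String × List Int) :=
  let d1 := paragraph1.foldl (fun d w => d.modify w [0, 0] pvBump0)
              (PySem.Dict.empty : PySem.Dict String (List Int))
  let d2 := paragraph2.foldl (fun d w => d.modify w [0, 0] pvBump1) d1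
  d2.items

-- ===== PRECONDITION & SPEC =====
def Spec_similarityAnalysis (paragraph1 : List String) (paragraph2 : List String) (out : List (String × List Int)) : Prop := out = similarityAnalysis_alt paragraph1 paragraph2
instance (paragraph1 : List String) (paragraph2 : List String) (out : List (String × List Int)) : Decidable (Spec_similarityAnalysis paragraph1 paragraph2 out) := by unfold Spec_similarityAnalysis; infer_instance

-- ===== CLAIM (what is proved, stated in full; the proofs are below) =====
def Claim_equal_similarityAnalysis : Prop := ∀ (paragraph1 : List String) (paragraph2 : List String), Dom_similarityAnalysis paragraph1 paragraph2 → Spec_similarityAnalysis paragraph1 paragraph2 (similarityAnalysis paragraph1 paragraph2)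

-- ===== LEMMAS AND PROOFS =====

-- A's inner counting loop is the list count
theorem pvCountLoop_eq (word : String) (lst : List String) :
    pvCountLoop word lst = (lst.count word : Int) := by
  unfold pvCountLoop
  suffices h : ∀ (a : Int), lst.foldl (fun c x => if word == x then c + 1 else c) a
      = a + (lst.count word : Int) by simpa using h 0
  induction lst with
  | nil => intro a; simp
  | cons x xs ih =>
      intro a
      by_cases hx : word = x
      · have hb : (word == x) = true := beq_iff_eq.mpr hx
        have hb2 : (x == word) = true := beq_iff_eq.mpr hx.symm
        rw [List.foldl_cons, if_pos hb, ih, List.count_cons, if_pos hb2]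
        push_cast; ring
      · have hb' : ¬ ((word == x) = true) := by simp [hx]
        have hb2 : ¬ ((x == word) = true) := by simp [Ne.symm hx]
        rw [List.foldl_cons, if_neg hb', ih, List.count_cons, if_neg hb2]
        simp

-- lookup after a fold of inserts whose value depends only on the key
theorem getD_foldl_insert_fn (f : String → List Int) (l : List String)
    (d : PySem.Dict String (List Int)) (k : String) (d0 : List Int) :
    (l.foldl (fun d w => d.insert w (f w)) d).getD k d0
      = if k ∈ l then f k else d.getD k d0 := by
  induction l generalizing d with
  | nil => simp
  | cons x xs ih =>
      simp only [List.foldl_cons, ih, PySem.Dict.getD_insert, List.mem_cons]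
      by_cases hk : k ∈ xs
      · simp [hk]
      · by_cases hx : k = x <;> simp [hx, hk]

-- lookup after a fold of modifies: the modifier is iterated count-many times
theorem getD_foldl_modify_fn (g : List Int → List Int) (d0 : List Int) (l : List String)
    (d : PySem.Dict String (List Int)) (k : String) :
    (l.foldl (fun d w => d.modify w d0 g) d).getD k d0
      = g^[l.count k] (d.getD k d0) := by
  induction l generalizing d with
  | nil => simp
  | cons x xs ih =>
      simp only [List.foldl_cons, ih, PySem.Dict.getD_modify, List.count_cons]
      by_cases hx : k = x
      · subst hx
        simp [Function.iterate_succ_apply]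
      · have : ¬ (x == k) = true := by simpa using fun h => hx (by simpa using h.symm)
        simp [hx, this]

theorem pvBump0_iter (n : Nat) (a b : Int) : pvBump0^[n] [a, b] = [a + n, b] := by
  induction n generalizing a with
  | zero => simp
  | succ m ih => simp [Function.iterate_succ_apply, pvBump0, ih]; ring

theorem pvBump1_iter (n : Nat) (a b : Int) : pvBump1^[n] [a, b] = [a, b + n] := by
  induction n generalizing b with
  | zero => simp
  | succ m ih => simp [Function.iterate_succ_apply, pvBump1, ih]; ring

theorem similarityAnalysis_spec : Claim_equal_similarityAnalysis := by
  unfold Claim_equal_similarityAnalysis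
  intro p1 p2 _
  unfold Spec_similarityAnalysis similarityAnalysis similarityAnalysis_alt
  set dA := (p1 ++ p2).foldl
      (fun d word => d.insert word [pvCountLoop word p1, pvCountLoop word p2])
      (PySem.Dict.empty : PySem.Dict String (List Int)) with hdA
  set dB := p2.foldl (fun d w => d.modify w [0, 0] pvBump1)
      (p1.foldl (fun d w => d.modify w [0, 0] pvBump0)
        (PySem.Dict.empty : PySem.Dict String (List Int))) with hdB
  -- keys agree
  have hkA : dA.keys = PySem.Set.ofList (p1 ++ p2) := by
    rw [hdA, PySem.Dict.keys_foldl_insert]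
    simp [PySem.Set.update_nil_left]
  have hkB : dB.keys = PySem.Set.ofList (p1 ++ p2) := by
    rw [hdB, PySem.Dict.keys_foldl_modify, PySem.Dict.keys_foldl_modify]
    simp [PySem.Set.ofList_append, PySem.Set.update_nil_left]
  have hndA : dA.keys.Nodup := by rw [hkA]; exact PySem.Set.nodup_ofList _
  have hndB : dB.keys.Nodup := by rw [hkB]; exact PySem.Set.nodup_ofList _
  -- items via keys + getD
  have hiA := PySem.Dict.items_eq_map_keys dA hndA ([0, 0] : List Int)
  have hiB := PySem.Dict.items_eq_map_keys dB hndB ([0, 0] : List Int)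
  rw [hiA, hiB, hkA, hkB]
  apply List.map_congr_left
  intro k hk
  have hkmem : k ∈ p1 ++ p2 := (PySem.Set.mem_ofList _ _).mp hk
  have hA : dA.getD k [0, 0] = [pvCountLoop k p1, pvCountLoop k p2] := by
    rw [hdA, getD_foldl_insert_fn]
    simp [hkmem]
  have hB : dB.getD k [0, 0] = [(p1.count k : Int), (p2.count k : Int)] := by
    rw [hdB, getD_foldl_modify_fn, getD_foldl_modify_fn]
    simp [pvBump0_iter, pvBump1_iter]
  rw [hA, hB, pvCountLoop_eq, pvCountLoop_eq]
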